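-- pv_equiv track=rewrite | github.com/trovalyok/1-10 | 10.py | subjects_not_passed_by_all_students
-- ===== SOURCE A (Python) =====
-- def subjects_not_passed_by_all_students(student_exams):
--     subject = {}
--     result = set()
--
--     for i in student_exams:
--         if i[2] not in subject:
--             subject[i[2]] = set()
--         subject[i[2]].add(i[1])
--
--     for i in subject:
--         if max(subject[i]) < 60:
--             result.add(i)
--
--     return result
-- ===== SOURCE B (Python) =====
-- def subjects_not_passed_by_all_students(student_exams):
--     all_subjects = set()
--     passed = set()
--     for i in student_exams:
--         all_subjects.add(i[2])
--         if i[1] >= 60: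
--             passed.add(i[2])
--     return all_subjects - passed
-- ===== Notes on version B (the rewrite author's own statement) =====
-- stated objective: simpler
-- what changed: Single pass keeping two flat sets (all subjects, subjects with a passing score) and returning their set difference, instead of grouping scores per subject into a dict of sets and then reducing each group with max in a second loop.
import Mathlib
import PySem

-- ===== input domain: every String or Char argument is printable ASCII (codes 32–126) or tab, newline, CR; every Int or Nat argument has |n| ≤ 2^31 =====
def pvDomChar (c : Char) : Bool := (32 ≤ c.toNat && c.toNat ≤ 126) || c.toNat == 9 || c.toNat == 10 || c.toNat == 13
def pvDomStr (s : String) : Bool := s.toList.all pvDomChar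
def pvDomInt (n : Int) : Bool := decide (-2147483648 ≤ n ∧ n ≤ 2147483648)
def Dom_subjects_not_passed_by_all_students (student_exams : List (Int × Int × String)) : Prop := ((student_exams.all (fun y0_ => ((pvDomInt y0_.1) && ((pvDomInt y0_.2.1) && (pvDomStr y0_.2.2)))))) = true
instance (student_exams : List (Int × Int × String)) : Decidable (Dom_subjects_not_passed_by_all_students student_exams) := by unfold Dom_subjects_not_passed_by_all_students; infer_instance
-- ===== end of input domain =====

-- B replaces A's dict-of-score-sets plus a second max-reduction loop by one pass keeping
-- two flat sets (all subjects, subjects with a passing score) and a final set difference.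

-- ===== PORT A =====
-- the loop body 'if i[2] not in subject: subject[i[2]] = set()' then 'subject[i[2]].add(i[1])'
def pvStepA (d : PySem.Dict String (PySem.Set Int)) (i : Int × Int × String) :
    PySem.Dict String (PySem.Set Int) :=
  let d' := if d.contains i.2.2 then d else d.insert i.2.2 PySem.Set.empty
  d'.modify i.2.2 PySem.Set.empty (fun s => PySem.Set.add s i.2.1)

def subjects_not_passed_by_all_students (student_exams : List (Int × Int × String)) : List String :=
  let subject : PySem.Dict String (PySem.Set Int) := student_exams.foldl pvStepA PySem.Dict.empty
  -- 'for i in subject: if max(subject[i]) < 60: result.add(i)'; the none branch of max is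
  -- unreachable (every key of subject has a nonempty score set)
  subject.keys.foldl (fun r k =>
      match PySem.List.max? (subject.getD k PySem.Set.empty) (fun x => x) with
      | some m => if m < 60 then PySem.Set.add r k else r
      | none => r)
    PySem.Set.empty

-- ===== PORT B =====
def subjects_not_passed_by_all_students_alt (student_exams : List (Int × Int × String)) : List String :=
  let p := student_exams.foldl
    (fun (st : PySem.Set String × PySem.Set String) i =>
      (PySem.Set.add st.1 i.2.2, if 60 ≤ i.2.1 then PySem.Set.add st.2 i.2.2 else st.2))
    (PySem.Set.empty, PySem.Set.empty)
  PySem.Set.diff p.1 p.2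

-- ===== PRECONDITION & SPEC =====
def Spec_subjects_not_passed_by_all_students (student_exams : List (Int × Int × String)) (out : List String) : Prop := out = subjects_not_passed_by_all_students_alt student_exams
instance (student_exams : List (Int × Int × String)) (out : List String) : Decidable (Spec_subjects_not_passed_by_all_students student_exams out) := by unfold Spec_subjects_not_passed_by_all_students; infer_instance

-- ===== CLAIM (what is proved, stated in full; the proofs are below) =====
def Claim_equal_subjects_not_passed_by_all_students : Prop := ∀ (student_exams : List (Int × Int × String)), Dom_subjects_not_passed_by_all_students student_exams → Spec_subjects_not_passed_by_all_students student_exams (subjects_not_passed_by_all_students student_exams)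

-- ===== LEMMAS AND PROOFS =====

lemma pvStepA_getD (d : PySem.Dict String (PySem.Set Int)) (i : Int × Int × String) (k : String) :
    (pvStepA d i).getD k PySem.Set.empty =
      if k = i.2.2 then PySem.Set.add (d.getD k PySem.Set.empty) i.2.1
      else d.getD k PySem.Set.empty := by
  unfold pvStepA
  by_cases h : d.contains i.2.2 = true
  · rw [if_pos h, PySem.Dict.getD_modify]
    split_ifs with hk
    · subst hk; rfl
    · rfl
  · have h' : d.contains i.2.2 = false := Bool.eq_false_iff.mpr h
    rw [if_neg h, PySem.Dict.getD_modify, PySem.Dict.getD_insert_self]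
    by_cases hk : k = i.2.2
    · subst hk
      rw [if_pos rfl, if_pos rfl, PySem.Dict.getD_of_not_contains d PySem.Set.empty h']
    · rw [if_neg hk, if_neg hk, PySem.Dict.getD_insert_of_ne d _ _ hk]

lemma pvStepA_keys (d : PySem.Dict String (PySem.Set Int)) (i : Int × Int × String) :
    (pvStepA d i).keys = PySem.Set.add d.keys i.2.2 := by
  unfold pvStepA
  by_cases h : d.contains i.2.2 = true
  · rw [if_pos h, PySem.Dict.keys_modify, PySem.Dict.keys_insert_of_contains _ _ h]
    rw [PySem.Dict.contains_eq_decide_mem_keys] at h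
    simp only [decide_eq_true_eq] at h
    simp [PySem.Set.add, PySem.Set.contains, h]
  · have h' : d.contains i.2.2 = false := Bool.eq_false_iff.mpr h
    rw [if_neg h, PySem.Dict.keys_modify,
      PySem.Dict.keys_insert_of_contains _ _ (by simp [PySem.Dict.contains_insert_self]),
      PySem.Dict.keys_insert_of_not_contains _ _ h']
    rw [PySem.Dict.contains_eq_decide_mem_keys] at h'
    simp only [decide_eq_false_iff_not] at h'
    simp [PySem.Set.add, PySem.Set.contains, h']

lemma pvFoldA_keys (l : List (Int × Int × String)) (d : PySem.Dict String (PySem.Set Int)) :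
    (l.foldl pvStepA d).keys = PySem.Set.update d.keys (l.map (·.2.2)) := by
  induction l generalizing d with
  | nil => simp [PySem.Set.update]
  | cons i t ih =>
    simp only [List.foldl_cons, List.map_cons, PySem.Set.update] at *
    rw [ih, pvStepA_keys]

lemma pvFoldA_mem_getD (l : List (Int × Int × String)) (d : PySem.Dict String (PySem.Set Int))
    (k : String) (v : Int) :
    v ∈ (l.foldl pvStepA d).getD k PySem.Set.empty ↔
      v ∈ d.getD k PySem.Set.empty ∨ ∃ i ∈ l, i.2.2 = k ∧ i.2.1 = v := by
  induction l generalizing d with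
  | nil => simp
  | cons i t ih =>
    rw [List.foldl_cons, ih, pvStepA_getD]
    by_cases hk : k = i.2.2
    · rw [if_pos hk]
      rw [PySem.Set.mem_add]
      constructor
      · rintro (⟨h | h⟩ | h)
        · exact Or.inl h
        · exact Or.inr ⟨i, by simp, hk.symm, h.symm⟩
        · obtain ⟨j, hj, hjk, hjv⟩ := h
          exact Or.inr ⟨j, by simp [hj], hjk, hjv⟩
      · rintro (h | ⟨j, hj, hjk, hjv⟩)
        · exact Or.inl (Or.inl h)
        · rcases List.mem_cons.mp hj with rfl | hj
          · exact Or.inl (Or.inr hjv.symm)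
          · exact Or.inr ⟨j, hj, hjk, hjv⟩
    · rw [if_neg hk]
      constructor
      · rintro (h | ⟨j, hj, hjk, hjv⟩)
        · exact Or.inl h
        · exact Or.inr ⟨j, by simp [hj], hjk, hjv⟩
      · rintro (h | ⟨j, hj, hjk, hjv⟩)
        · exact Or.inl h
        · rcases List.mem_cons.mp hj with rfl | hj
          · exact absurd hjk.symm hk
          · exact Or.inr ⟨j, hj, hjk, hjv⟩

lemma pvFoldB_passed_mem (l : List (Int × Int × String)) (p : PySem.Set String) (k : String) :
    k ∈ l.foldl (fun s i => if 60 ≤ i.2.1 then PySem.Set.add s i.2.2 else s) p ↔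
      k ∈ p ∨ ∃ i ∈ l, i.2.2 = k ∧ 60 ≤ i.2.1 := by
  induction l generalizing p with
  | nil => simp
  | cons i t ih =>
    simp only [List.foldl_cons, ih]
    by_cases h : (60 : Int) ≤ i.2.1
    · simp only [if_pos h, PySem.Set.mem_add]
      constructor
      · rintro (⟨hp | rfl⟩ | ⟨j, hj, hjk, hjs⟩)
        · exact Or.inl hp
        · exact Or.inr ⟨i, by simp, rfl, h⟩
        · exact Or.inr ⟨j, by simp [hj], hjk, hjs⟩
      · rintro (hp | ⟨j, hj, hjk, hjs⟩)
        · exact Or.inl (Or.inl hp)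
        · rcases List.mem_cons.mp hj with rfl | hj
          · exact Or.inl (Or.inr hjk.symm)
          · exact Or.inr ⟨j, hj, hjk, hjs⟩
    · simp only [if_neg h]
      constructor
      · rintro (hp | ⟨j, hj, hjk, hjs⟩)
        · exact Or.inl hp
        · exact Or.inr ⟨j, by simp [hj], hjk, hjs⟩
      · rintro (hp | ⟨j, hj, hjk, hjs⟩)
        · exact Or.inl hp
        · rcases List.mem_cons.mp hj with rfl | hj
          · exact absurd hjs h
          · exact Or.inr ⟨j, hj, hjk, hjs⟩

-- folding Set.add over a duplicate-free list of fresh elements just appends it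
lemma pvFoldl_add_nodup_fresh (xs : List String) : ∀ (s : PySem.Set String), xs.Nodup →
    (∀ x ∈ xs, x ∉ s) → xs.foldl PySem.Set.add s = s ++ xs := by
  induction xs with
  | nil => simp
  | cons x t ih =>
    intro s hnd hfresh
    have hx : PySem.Set.add s x = s ++ [x] := by
      simp only [PySem.Set.add, PySem.Set.contains]
      rw [if_neg]
      simp only [List.contains_iff_mem]
      exact hfresh x (by simp)
    rw [List.foldl_cons, hx, ih (s ++ [x]) (List.nodup_cons.mp hnd).2]
    · simp
    · intro y hy
      simp only [List.mem_append, List.mem_singleton, not_or]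
      exact ⟨hfresh y (by simp [hy]), fun h => (List.nodup_cons.mp hnd).1 (h ▸ hy)⟩

-- ===== VERDICT (by name: the statement is the Claim_ definition above) =====
theorem subjects_not_passed_by_all_students_spec : Claim_equal_subjects_not_passed_by_all_students := by
  intro l _
  unfold Spec_subjects_not_passed_by_all_students
  unfold subjects_not_passed_by_all_students subjects_not_passed_by_all_students_alt
  simp only []
  rw [PySem.List.foldl_prod_mk (f := fun s (i : Int × Int × String) => PySem.Set.add s i.2.2)
      (g := fun s (i : Int × Int × String) => if 60 ≤ i.2.1 then PySem.Set.add s i.2.2 else s)]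
  set d := l.foldl pvStepA PySem.Dict.empty with hd
  set passed := l.foldl (fun s (i : Int × Int × String) =>
      if 60 ≤ i.2.1 then PySem.Set.add s i.2.2 else s) PySem.Set.empty with hpassed
  -- B's all_subjects set equals A's dict key list
  have hall : l.foldl (fun s (i : Int × Int × String) => PySem.Set.add s i.2.2) PySem.Set.empty
      = d.keys := by
    rw [hd, pvFoldA_keys]
    simp only [PySem.Dict.keys, PySem.Dict.empty, PySem.Set.update, List.map_nil]
    rw [List.foldl_map]
    rfl
  rw [hall]
  -- keys membership: k ∈ d.keys ↔ some exam has subject k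
  have hkeysmem : ∀ k : String, k ∈ d.keys ↔ ∃ i ∈ l, i.2.2 = k := by
    intro k
    rw [hd, pvFoldA_keys]
    simp only [PySem.Dict.keys, PySem.Dict.empty, List.map_nil]
    have : PySem.Set.update ([] : PySem.Set String) (l.map (·.2.2)) =
        PySem.Set.ofList (l.map (·.2.2)) := rfl
    rw [this, PySem.Set.mem_ofList]
    simp
  have hnodup : d.keys.Nodup := by
    rw [hd, pvFoldA_keys]
    simp only [PySem.Dict.keys, PySem.Dict.empty, List.map_nil]
    exact PySem.Set.nodup_ofList (l.map (·.2.2))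
  -- A's second loop as a filter
  have hstep : ∀ (r : PySem.Set String) (k : String),
      (match PySem.List.max? (d.getD k PySem.Set.empty) (fun x => x) with
        | some m => if m < 60 then PySem.Set.add r k else r
        | none => r) =
      if (match PySem.List.max? (d.getD k PySem.Set.empty) (fun x => x) with
          | some m => decide (m < 60)
          | none => false) = true then PySem.Set.add r k else r := by
    intro r k
    cases hmx : PySem.List.max? (d.getD k PySem.Set.empty) (fun x => x) with
    | none => simp
    | some m => by_cases hm : m < 60 <;> simp [hm]
  have hAfilter : d.keys.foldl (fun r k =>
      match PySem.List.max? (d.getD k PySem.Set.empty) (fun x => x) with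
      | some m => if m < 60 then PySem.Set.add r k else r
      | none => r) PySem.Set.empty =
      d.keys.filter (fun k =>
        match PySem.List.max? (d.getD k PySem.Set.empty) (fun x => x) with
        | some m => decide (m < 60)
        | none => false) := by
    rw [PySem.List.foldl_congr_mem d.keys _ (fun r k =>
        if (match PySem.List.max? (d.getD k PySem.Set.empty) (fun x => x) with
            | some m => decide (m < 60)
            | none => false) = true then PySem.Set.add r k else r)
        PySem.Set.empty (fun r k _ => hstep r k)]
    rw [PySem.List.foldl_if_eq_foldl_filter]
    rw [pvFoldl_add_nodup_fresh _ _ (List.Nodup.filter _ hnodup) (by simp [PySem.Set.empty])]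
    simp [PySem.Set.empty]
  rw [hAfilter]
  -- B's diff is a filter over the same list; the two filter predicates agree on keys
  simp only [PySem.Set.diff, PySem.Set.contains]
  apply List.filter_congr
  intro k hk
  obtain ⟨i0, hi0, hi0k⟩ := (hkeysmem k).mp hk
  have hmem : ∀ v : Int, v ∈ d.getD k PySem.Set.empty ↔ ∃ i ∈ l, i.2.2 = k ∧ i.2.1 = v := by
    intro v
    rw [hd, pvFoldA_mem_getD]
    simp [PySem.Dict.getD_empty, PySem.Set.empty]
  have hne : d.getD k PySem.Set.empty ≠ [] := by
    intro h0
    have := (hmem i0.2.1).mpr ⟨i0, hi0, hi0k, rfl⟩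
    rw [h0] at this
    exact absurd this (List.not_mem_nil)
  cases hmx : PySem.List.max? (d.getD k PySem.Set.empty) (fun x => x) with
  | none => exact absurd ((PySem.List.max?_eq_none_iff _ _).mp hmx) hne
  | some m =>
    have hmmem := PySem.List.max?_mem hmx
    have hmmax := PySem.List.max?_isMax hmx
    have hpass : k ∈ passed ↔ ∃ i ∈ l, i.2.2 = k ∧ 60 ≤ i.2.1 := by
      rw [hpassed, pvFoldB_passed_mem]
      simp [PySem.Set.empty]
    by_cases hm : m < 60
    · have hnp : k ∉ passed := by
        rw [hpass]
        rintro ⟨i, hi, hik, his⟩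
        have := hmmax i.2.1 ((hmem i.2.1).mpr ⟨i, hi, hik, rfl⟩)
        omega
      simp [hm, hnp]
    · have hp : k ∈ passed := by
        rw [hpass]
        obtain ⟨i, hi, hik, hiv⟩ := (hmem m).mp hmmem
        exact ⟨i, hi, hik, by omega⟩
      simp [hm, hp]
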